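-- pv_equiv track=rewrite | github.com/guige2023/rabai_autoclick | actions/numbers_action.py | next_power_of
-- ===== SOURCE A (Python) =====
-- def next_power_of(n: int, base: int) -> int:
--     """Find the smallest power of base >= n."""
--     if n <= 1:
--         return 1
--     if base <= 1:
--         raise ValueError("base must be > 1")
--     power = 1
--     while power < n:
--         power *= base
--     return power
-- ===== SOURCE B (Python) =====
-- def next_power_of(n: int, base: int) -> int:
--     """Find the smallest power of base >= n."""
--     if n <= 1:
--         return 1
--     if base <= 1:
--         raise ValueError("base must be > 1")
--     return base * next_power_of(-(-n // base), base)
-- ===== Notes on version B (the rewrite author's own statement) =====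
-- stated objective: simpler
-- what changed: Replaces the iterative multiply-up while loop with a recursive divide-down: next_power_of(n) = base * next_power_of(ceil(n/base)), keeping the same guards; no extra state variable.
import Mathlib
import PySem

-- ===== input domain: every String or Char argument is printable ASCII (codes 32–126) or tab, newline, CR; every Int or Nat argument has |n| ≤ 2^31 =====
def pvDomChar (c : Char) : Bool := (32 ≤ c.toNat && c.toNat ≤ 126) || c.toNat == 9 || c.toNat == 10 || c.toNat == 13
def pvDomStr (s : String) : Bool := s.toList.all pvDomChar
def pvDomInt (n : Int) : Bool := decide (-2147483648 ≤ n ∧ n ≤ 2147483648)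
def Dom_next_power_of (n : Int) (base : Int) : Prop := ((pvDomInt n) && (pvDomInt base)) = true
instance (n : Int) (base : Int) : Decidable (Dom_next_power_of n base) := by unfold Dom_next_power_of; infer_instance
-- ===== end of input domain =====

-- B replaces A's iterative multiply-up loop with a recursive divide-down (base * f(ceil(n/base)));
-- objective: simpler (same asymptotic cost). Equivalence is about return values on Pre_ (A raises ValueError off Pre_).

-- ===== PORT A =====
-- while power < n: power *= base.  The extra ∧-conjuncts (1 ≤ power, 2 ≤ base) are totality guards only:
-- the loop is entered with power = 1 and base ≥ 2 (base ≤ 1 raised before it), where they always hold.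
def npLoop (power n base : Int) : Int :=
  if _h : power < n ∧ 1 ≤ power ∧ 2 ≤ base then
    npLoop (power * base) n base
  else power
termination_by (n - power).toNat
decreasing_by
  obtain ⟨h1, h2, h3⟩ := _h
  have : power + 1 ≤ power * base := by nlinarith
  omega

def next_power_of (n : Int) (base : Int) : Int :=
  if n ≤ 1 then 1
  else if base ≤ 1 then 1  -- Python: raise ValueError("base must be > 1"); excluded by Pre_
  else npLoop 1 n base

-- ===== PORT B =====
def next_power_of_alt (n : Int) (base : Int) : Int :=
  if n ≤ 1 then 1
  else if base ≤ 1 then 1  -- Python: raise ValueError("base must be > 1"); excluded by Pre_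
  else base * next_power_of_alt (-(PySem.Int.floordiv (-n) base)) base
termination_by n.toNat
decreasing_by
  rename_i h1 h2
  obtain ⟨hm1, _⟩ :=
    (PySem.Int.neg_floordiv_neg_eq_iff_of_pos (a := n) (b := base)
      (q := -(PySem.Int.floordiv (-n) base)) (by omega)).mp rfl
  have : -(PySem.Int.floordiv (-n) base) < n := by nlinarith
  omega

-- ===== PRECONDITION & SPEC =====
-- Pre_ excludes exactly the inputs (n ≥ 2, base ≤ 1) on which Python A raises ValueError.
def Pre_next_power_of (n : Int) (base : Int) : Prop := n ≤ 1 ∨ 2 ≤ base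
instance (n : Int) (base : Int) : Decidable (Pre_next_power_of n base) := by
  unfold Pre_next_power_of; infer_instance
def pvWitness_next_power_of : Int × Int := (100, 3)

def Spec_next_power_of (n : Int) (base : Int) (out : Int) : Prop := out = next_power_of_alt n base
instance (n : Int) (base : Int) (out : Int) : Decidable (Spec_next_power_of n base out) := by
  unfold Spec_next_power_of; infer_instance

-- ===== CLAIM (what is proved, stated in full; the proofs are below) =====
def Claim_equal_next_power_of : Prop := ∀ (n : Int) (base : Int), Dom_next_power_of n base → Pre_next_power_of n base → Spec_next_power_of n base (next_power_of n base)

-- ===== LEMMAS AND PROOFS =====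

-- ceiling-division bounds for m = -((-n) // base)
theorem np_ceil_bounds (n base : Int) (hb : 2 ≤ base) :
    (-(PySem.Int.floordiv (-n) base) - 1) * base < n ∧
      n ≤ -(PySem.Int.floordiv (-n) base) * base :=
  (PySem.Int.neg_floordiv_neg_eq_iff_of_pos (by omega)).mp rfl

-- scaling: one multiplication of the loop's accumulator corresponds to one ceiling division of n
theorem npLoop_scale (n base : Int) (hb : 2 ≤ base) :
    ∀ (k : Nat) (p : Int), 1 ≤ p → (n - p * base).toNat ≤ k →
      npLoop (p * base) n base = base * npLoop p (-(PySem.Int.floordiv (-n) base)) base := by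
  obtain ⟨hm1, hm2⟩ := np_ceil_bounds n base hb
  intro k
  induction k with
  | zero =>
    intro p hp hk
    have hstop : ¬ p * base < n := by omega
    have hstop' : ¬ p < -(PySem.Int.floordiv (-n) base) := by
      intro hlt
      have : (-(PySem.Int.floordiv (-n) base) - 1) * base < p * base := by omega
      nlinarith
    rw [npLoop, dif_neg (fun h => hstop h.1)]
    conv_rhs => rw [npLoop, dif_neg (fun h => hstop' h.1)]
    ring
  | succ k ih =>
    intro p hp hk
    by_cases hlt : p * base < n
    · have hlt' : p < -(PySem.Int.floordiv (-n) base) := by nlinarith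
      have h1 : (1:Int) ≤ p * base := by nlinarith
      have h2 : p * base + 1 ≤ p * base * base := by nlinarith
      rw [npLoop, dif_pos ⟨hlt, h1, hb⟩, ih (p * base) h1 (by omega)]
      conv_rhs => rw [npLoop, dif_pos ⟨hlt', hp, hb⟩]
    · have hstop' : ¬ p < -(PySem.Int.floordiv (-n) base) := by
        intro hc
        have : (-(PySem.Int.floordiv (-n) base) - 1) * base < p * base := by omega
        nlinarith
      rw [npLoop, dif_neg (fun h => hlt h.1)]
      conv_rhs => rw [npLoop, dif_neg (fun h => hstop' h.1)]
      ring

theorem alt_eq_loop (base : Int) (hb : 2 ≤ base) :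
    ∀ (k : Nat) (n : Int), n.toNat ≤ k → next_power_of_alt n base = npLoop 1 n base := by
  intro k
  induction k with
  | zero =>
    intro n hn
    have h1 : n ≤ 1 := by omega
    rw [next_power_of_alt, npLoop]
    simp [h1, show ¬ (1:Int) < n by omega]
  | succ k ih =>
    intro n hn
    by_cases h1 : n ≤ 1
    · rw [next_power_of_alt, npLoop]
      simp [h1, show ¬ (1:Int) < n by omega]
    · obtain ⟨hm1, hm2⟩ := np_ceil_bounds n base hb
      have hmn : -(PySem.Int.floordiv (-n) base) < n := by nlinarith
      rw [next_power_of_alt]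
      simp only [h1, if_false, show ¬ base ≤ 1 by omega, if_false]
      rw [ih _ (by omega)]
      conv_rhs => rw [npLoop, dif_pos ⟨show (1:Int) < n by omega, le_rfl, hb⟩]
      exact (npLoop_scale n base hb (n - 1 * base).toNat 1 le_rfl le_rfl).symm

-- ===== VERDICT (by name: the statement is the Claim_ definition above) =====
theorem next_power_of_spec : Claim_equal_next_power_of := by
  intro n base _ hpre
  unfold Spec_next_power_of next_power_of
  by_cases h1 : n ≤ 1
  · rw [next_power_of_alt]; simp [h1]
  · have hb : 2 ≤ base := by rcases hpre with h | h; omega; exact h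
    simp only [h1, if_false, show ¬ base ≤ 1 by omega, if_false]
    exact (alt_eq_loop base hb n.toNat n le_rfl).symm
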